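-- pv_equiv track=rewrite | github.com/a-mavrides/roomba_v4 | coordinator.py | _normalize_water_level_value
-- ===== SOURCE A (Python) =====
-- def _normalize_water_level_value(option: str | None, fallback: int | None = None) -> int | None:
--     text = str(option or "").strip()
--     if text:
--         digits = "".join(ch for ch in text if ch.isdigit())
--         if digits:
--             try:
--                 value = int(digits)
--             except ValueError:
--                 value = None
--             else:
--                 if value > 0:
--                     return value
--     return fallback
-- ===== SOURCE B (Python) =====
-- def _normalize_water_level_value(option: str | None, fallback: int | None = None) -> int | None:
--     # Single pass with a numeric accumulator instead of building a digit string and parsing it.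
--     text = str(option or "").strip()
--     value = 0
--     seen = False
--     for ch in text:
--         if ch.isdigit():
--             value = value * 10 + (ord(ch) - 48)
--             seen = True
--     if seen and value > 0:
--         return value
--     return fallback
-- ===== Notes on version B (the rewrite author's own statement) =====
-- stated objective: faster
-- what changed: Instead of joining the digit characters into a string and parsing it with int(), B accumulates the value numerically in a single pass (value = value*10 + digit) with a seen-a-digit flag, so no intermediate string is built and no parse/try-except is needed.
import Mathlib
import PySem

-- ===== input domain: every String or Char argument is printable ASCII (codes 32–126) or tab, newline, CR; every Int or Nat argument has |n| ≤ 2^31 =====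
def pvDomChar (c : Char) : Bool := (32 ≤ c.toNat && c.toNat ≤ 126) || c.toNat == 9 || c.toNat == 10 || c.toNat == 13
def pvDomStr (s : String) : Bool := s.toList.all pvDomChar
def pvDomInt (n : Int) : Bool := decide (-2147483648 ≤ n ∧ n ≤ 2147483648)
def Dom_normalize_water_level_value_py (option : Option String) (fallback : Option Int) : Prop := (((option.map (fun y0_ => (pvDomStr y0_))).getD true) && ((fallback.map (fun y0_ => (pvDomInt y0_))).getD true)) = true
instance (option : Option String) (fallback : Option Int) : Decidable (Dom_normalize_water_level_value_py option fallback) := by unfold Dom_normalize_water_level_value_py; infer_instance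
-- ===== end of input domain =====

-- B replaces A's join-digits-then-int() parse with a single pass that accumulates the value
-- numerically (value*10 + digit) and a seen-a-digit flag (an alternative decomposition).


-- ===== PORT A =====
-- int(digits) ported by hand as pvDecimalVal: exact here because digits is the isdigit-filter of
-- text, so whenever it is nonempty it is a pure '0'-'9' string, on which int() returns exactly
-- this decimal value and never raises (the except ValueError branch is unreachable).
def pvDecimalVal (ds : List Char) : Int :=
  ds.foldl (fun a c => a * 10 + ((c.toNat : Int) - 48)) 0

def normalize_water_level_value_py (option : Option String) (fallback : Option Int) : Option Int :=
  let text := PySem.Chars.strip (option.getD "").toList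
  if text ≠ [] then
    let digits := text.filter PySem.Chars.isdigit
    if digits ≠ [] then
      let value := pvDecimalVal digits
      if value > 0 then some value else fallback
    else fallback
  else fallback

-- ===== PORT B =====
def nwlLoop : List Char → Int → Bool → Int × Bool
  | [], value, seen => (value, seen)
  | c :: cs, value, seen =>
    if PySem.Chars.isdigit c then nwlLoop cs (value * 10 + ((c.toNat : Int) - 48)) true
    else nwlLoop cs value seen

def normalize_water_level_value_py_alt (option : Option String) (fallback : Option Int) : Option Int :=
  let text := PySem.Chars.strip (option.getD "").toList
  let vs := nwlLoop text 0 false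
  if vs.2 && vs.1 > 0 then some vs.1 else fallback

-- ===== PRECONDITION & SPEC =====
def Spec_normalize_water_level_value_py (option : Option String) (fallback : Option Int) (out : Option Int) : Prop := out = normalize_water_level_value_py_alt option fallback
instance (option : Option String) (fallback : Option Int) (out : Option Int) : Decidable (Spec_normalize_water_level_value_py option fallback out) := by unfold Spec_normalize_water_level_value_py; infer_instance

-- ===== CLAIM (what is proved, stated in full; the proofs are below) =====
def Claim_equal_normalize_water_level_value_py : Prop := ∀ (option : Option String) (fallback : Option Int), Dom_normalize_water_level_value_py option fallback → Spec_normalize_water_level_value_py option fallback (normalize_water_level_value_py option fallback)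

-- ===== LEMMAS AND PROOFS =====
-- B's loop computes A's fold over the digit filter, and the seen flag records whether any digit occurred.
theorem nwlLoop_eq (cs : List Char) (v : Int) (s : Bool) :
    nwlLoop cs v s =
      ((cs.filter PySem.Chars.isdigit).foldl (fun a c => a * 10 + ((c.toNat : Int) - 48)) v,
        s || cs.any PySem.Chars.isdigit) := by
  induction cs generalizing v s with
  | nil => simp [nwlLoop]
  | cons c cs ih =>
    by_cases h : PySem.Chars.isdigit c
    · simp [nwlLoop, h, ih]
    · simp [nwlLoop, h, ih]

theorem any_eq_filter_ne (cs : List Char) :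
    cs.any PySem.Chars.isdigit = !(cs.filter PySem.Chars.isdigit).isEmpty := by
  induction cs with
  | nil => simp
  | cons c cs ih => by_cases h : PySem.Chars.isdigit c <;> simp [h, ih]

-- ===== VERDICT (by name: the statement is the Claim_ definition above) =====
theorem normalize_water_level_value_py_spec : Claim_equal_normalize_water_level_value_py := by
  intro option fallback _
  unfold Spec_normalize_water_level_value_py
  unfold normalize_water_level_value_py normalize_water_level_value_py_alt
  simp only [nwlLoop_eq, any_eq_filter_ne, Bool.false_or]
  set text := PySem.Chars.strip (option.getD "").toList with htext
  by_cases ht : text = []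
  · simp [ht]
  · simp only [ht, ne_eq, not_false_eq_true, if_true]
    by_cases hd : text.filter PySem.Chars.isdigit = []
    · simp [hd]
    · simp only [hd, not_false_eq_true, if_true, pvDecimalVal]
      by_cases hv :
          (text.filter PySem.Chars.isdigit).foldl (fun a c => a * 10 + ((c.toNat : Int) - 48)) 0 > 0
      · simp [hd, hv]
      · simp [hv]
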